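-- pv_equiv track=rewrite | github.com/dexffe/diskreta | 10.02.25/program.py | alg1
-- ===== SOURCE A (Python) =====
-- def alg1(graf: list) -> int:
--     start_list = [i for i in range(1, len(graf)+1)]
--     l = []
--     end_list = []
--     isNext = True
--     for i in [i for i in range(1, len(graf)+1)]:
--         isNext = True
--         for j in range(len(graf[i-1])):
--             if (j+1 not in end_list) and (graf[i-1][j] == 1) and (j+1 in start_list):
--                 end_list.append(j+1)
--                 start_list.remove(j+1)
--                 isNext = False
--         if isNext and end_list != []:
--             l.append(end_list)
--             end_list = []
--     return len(l)
-- ===== SOURCE B (Python) =====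
-- def alg1(graf: list) -> int:
--     n = len(graf)
--     # Column-major view: endpoint j+1 is claimed by the FIRST row with a 1 in column j
--     # (the greedy removal in row order makes any later 1 in that column irrelevant).
--     first_rows = set()
--     for j in range(n):
--         for i, row in enumerate(graf):
--             if j < len(row) and row[j] == 1:
--                 first_rows.add(i)
--                 break
--     # A row opens/extends a group iff it is the first row of some column; a group is
--     # counted only when it is closed by a later matchless row (trailing group dropped),
--     # i.e. exactly at each True->False boundary of the row-flag sequence.
--     count = 0
--     for i in range(1, n):
--         if (i - 1) in first_rows and i not in first_rows:
--             count += 1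
--     return count
-- ===== Notes on version B (the rewrite author's own statement) =====
-- stated objective: alternative
-- what changed: Replaces A's row-sequential greedy matching with mutable start/end lists by a column-major computation (for each column, the first row holding a 1 claims it), then counts groups as True->False boundaries in the per-row claimed flags.
import Mathlib
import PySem

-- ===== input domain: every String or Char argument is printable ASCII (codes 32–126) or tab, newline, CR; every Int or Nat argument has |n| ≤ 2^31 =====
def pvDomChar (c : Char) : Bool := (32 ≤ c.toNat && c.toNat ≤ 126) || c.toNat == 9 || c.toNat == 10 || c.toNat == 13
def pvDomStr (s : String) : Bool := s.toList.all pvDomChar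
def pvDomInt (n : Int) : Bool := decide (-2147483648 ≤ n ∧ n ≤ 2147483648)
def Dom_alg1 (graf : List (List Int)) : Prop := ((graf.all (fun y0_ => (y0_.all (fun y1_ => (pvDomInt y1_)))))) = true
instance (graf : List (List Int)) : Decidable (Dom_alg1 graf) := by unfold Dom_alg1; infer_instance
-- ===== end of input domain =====

-- B replaces A's row-sequential greedy matching (mutable start/end lists) by a column-major
-- computation of each column's first hitting row plus a boundary count over the row flags;
-- objective: alternative (same asymptotic cost, different algorithm).


-- ===== PORT A =====
-- inner loop body: 'for j in range(len(graf[i-1])): if (j+1 not in end_list) and … '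
def alg1InnerStep (row : List Int) (t : List Int × List Int × Bool) (j : Int) :
    List Int × List Int × Bool :=
  let (start_list, end_list, isNext) := t
  if !end_list.contains (j+1) && (PySem.List.pyGetD row j 0 == 1) && start_list.contains (j+1) then
    -- 'j+1 in start_list' held, so start_list.remove(j+1) cannot raise; getD is never taken
    (((PySem.List.remove? start_list (j+1)).getD start_list), end_list ++ [j+1], false)
  else
    (start_list, end_list, isNext)

-- outer loop body over i ∈ range(1, len(graf)+1); graf[i-1] is always in range (no raise)
def alg1RowStep (graf : List (List Int)) (s : List Int × List (List Int) × List Int) (i : Int) :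
    List Int × List (List Int) × List Int :=
  let (start_list, l, end_list) := s
  let row := PySem.List.pyGetD graf (i-1) []
  let (start_list, end_list, isNext) :=
    (PySem.List.pyRange 0 (PySem.List.len row) 1).foldl (alg1InnerStep row) (start_list, end_list, true)
  if isNext && !(end_list == []) then (start_list, l ++ [end_list], [])
  else (start_list, l, end_list)

def alg1 (graf : List (List Int)) : Int :=
  let start_list := PySem.List.pyRange 1 (PySem.List.len graf + 1) 1
  let s := (PySem.List.pyRange 1 (PySem.List.len graf + 1) 1).foldl (alg1RowStep graf)
            (start_list, ([] : List (List Int)), ([] : List Int))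
  PySem.List.len s.2.1

-- ===== PORT B =====
-- 'for i, row in enumerate(graf): if j < len(row) and row[j] == 1: …; break'
def firstHit (j : Int) : List (List Int) → Int → Option Int
  | [], _ => none
  | row :: rest, i =>
    if decide (j < PySem.List.len row) && (PySem.List.pyGetD row j 0 == 1) then some i
    else firstHit j rest (i + 1)

def alg1_alt (graf : List (List Int)) : Int :=
  let n := PySem.List.len graf
  let first := (PySem.List.pyRange 0 n 1).foldl
    (fun s j => match firstHit j graf 0 with
      | some i => PySem.Set.add s i
      | none => s) PySem.Set.empty
  (PySem.List.pyRange 1 n 1).foldl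
    (fun c i => if PySem.Set.contains first (i-1) && !(PySem.Set.contains first i) then c + 1 else c) 0

-- ===== PRECONDITION & SPEC =====
def Spec_alg1 (graf : List (List Int)) (out : Int) : Prop := out = alg1_alt graf
instance (graf : List (List Int)) (out : Int) : Decidable (Spec_alg1 graf out) := by unfold Spec_alg1; infer_instance

-- ===== CLAIM (what is proved, stated in full; the proofs are below) =====
def Claim_equal_alg1 : Prop := ∀ (graf : List (List Int)), Dom_alg1 graf → Spec_alg1 graf (alg1 graf)

-- ===== LEMMAS AND PROOFS =====

-- intermediate MODEL shared by both proofs: per-row 'claimed a fresh endpoint' flags over a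
-- used-set, followed by a run-closing count; A is proved equal to it by the greedy invariant,
-- B by the first-hitting-row characterisation of the used-set.
def mColStep (n : Int) (t : PySem.Set Int × Bool) (jv : Int × Int) : PySem.Set Int × Bool :=
  if jv.2 == 1 && decide (1 ≤ jv.1 + 1) && decide (jv.1 + 1 ≤ n) && !(PySem.Set.contains t.1 (jv.1 + 1)) then
    (PySem.Set.add t.1 (jv.1 + 1), true)
  else t

def mRowStep (n : Int) (s : PySem.Set Int × List Bool) (row : List Int) :
    PySem.Set Int × List Bool :=
  let (used, hit) := (PySem.List.enumerate row).foldl (mColStep n) (s.1, false)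
  (used, s.2 ++ [hit])

def mCountStep (s : Int × Bool) (f : Bool) : Int × Bool :=
  if f then (s.1, true)
  else if s.2 then (s.1 + 1, false)
  else s

def mCount (graf : List (List Int)) : Int :=
  let n := PySem.List.len graf
  let flags := (graf.foldl (mRowStep n) (PySem.Set.empty, [])).2
  (flags.foldl mCountStep (0, false)).1

-- ---- A = model ----

-- A's start_list is always the not-yet-used part of [1..n]
def pvFilt (n : Int) (used : List Int) : List Int :=
  (PySem.List.pyRange 1 (n+1) 1).filter (fun x => !(PySem.Set.contains used x))

-- row-level form of A's outer body (graf[i-1] resolved to the row itself)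
def pvRowA (s : List Int × List (List Int) × List Int) (row : List Int) :
    List Int × List (List Int) × List Int :=
  let (start_list, l, end_list) := s
  let (start_list, end_list, isNext) :=
    (PySem.List.pyRange 0 (PySem.List.len row) 1).foldl (alg1InnerStep row) (start_list, end_list, true)
  if isNext && !(end_list == []) then (start_list, l ++ [end_list], [])
  else (start_list, l, end_list)

def pvColA (t : List Int × List Int × Bool) (jv : Int × Int) : List Int × List Int × Bool :=
  let (start_list, end_list, isNext) := t
  if !end_list.contains (jv.1+1) && (jv.2 == 1) && start_list.contains (jv.1+1) then
    (((PySem.List.remove? start_list (jv.1+1)).getD start_list), end_list ++ [jv.1+1], false)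
  else
    (start_list, end_list, isNext)

lemma pyRange_shift (a b : Int) : PySem.List.pyRange (a+1) (b+1) 1 = (PySem.List.pyRange a b 1).map (· + 1) := by
  rw [PySem.List.pyRange_one, PySem.List.pyRange_one, List.map_map]
  have : (b + 1 - (a + 1)) = b - a := by ring
  rw [this]
  apply List.map_congr_left
  intro k _
  simp only [Function.comp_apply]
  ring

lemma bridgeA (graf : List (List Int)) (init : List Int × List (List Int) × List Int) :
    (PySem.List.pyRange 1 (PySem.List.len graf + 1) 1).foldl (alg1RowStep graf) init
      = graf.foldl pvRowA init := by
  have h : PySem.List.pyRange 1 (PySem.List.len graf + 1) 1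
      = (PySem.List.pyRange 0 (PySem.List.len graf) 1).map (· + 1) := by
    simpa using pyRange_shift 0 (PySem.List.len graf)
  rw [h, List.foldl_map]
  have hb : ∀ (s : List Int × List (List Int) × List Int) (j : Int),
      alg1RowStep graf s (j+1) = pvRowA s (PySem.List.pyGetD graf j []) := by
    intro s j; simp [alg1RowStep, pvRowA]
  simp only [hb]
  simpa [PySem.List.len] using PySem.List.foldl_pyRange_pyGetD' graf [] pvRowA init (le_refl 0)

lemma bridgeInner (row : List Int) (t : List Int × List Int × Bool) :
    (PySem.List.pyRange 0 (PySem.List.len row) 1).foldl (alg1InnerStep row) t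
      = (PySem.List.enumerate row).foldl pvColA t := by
  rw [PySem.List.enumerate_eq_map_pyRange row 0, List.foldl_map]
  apply PySem.List.foldl_congr_mem
  intro acc x hx
  simp [alg1InnerStep, pvColA]

lemma mem_pvFilt {n : Int} {used : List Int} {k : Int} :
    k ∈ pvFilt n used ↔ (1 ≤ k ∧ k ≤ n) ∧ k ∉ used := by
  simp [pvFilt, PySem.List.mem_pyRange_one, PySem.Set.contains, Int.lt_add_one_iff]

lemma filt_remove (n : Int) (used : List Int) (k : Int) (hk : k ∈ pvFilt n used) :
    (PySem.List.remove? (pvFilt n used) k).getD (pvFilt n used)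
      = pvFilt n (PySem.Set.add used k) := by
  rw [PySem.List.remove?_eq_some_erase _ _ hk, Option.getD_some]
  have hnd : (pvFilt n used).Nodup := (PySem.List.nodup_pyRange_one 1 (n+1)).filter _
  rw [hnd.erase_eq_filter, pvFilt, List.filter_filter]
  have hku : k ∉ used := (mem_pvFilt.mp hk).2
  have hadd : PySem.Set.add used k = used ++ [k] := by
    simp [PySem.Set.add, PySem.Set.contains]
    intro h; exact absurd h hku
  rw [pvFilt, hadd]
  apply List.filter_congr
  intro x hx
  simp [PySem.Set.contains]
  by_cases hxk : x = k <;> simp [hxk]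

lemma cond_eq (n : Int) (used el : List Int) (j v : Int)
    (hd : ∀ k ∈ el, k ∉ pvFilt n used) :
    (!el.contains (j+1) && (v == 1) && (pvFilt n used).contains (j+1))
      = (v == 1 && decide (1 ≤ j+1) && decide (j+1 ≤ n) && !(PySem.Set.contains used (j+1))) := by
  rw [Bool.eq_iff_iff]
  simp only [Bool.and_eq_true, Bool.not_eq_true', beq_iff_eq, decide_eq_true_eq,
    List.contains_eq_mem, decide_eq_false_iff_not, PySem.Set.contains, List.elem_eq_contains]
  constructor
  · rintro ⟨⟨hel, hv⟩, hf⟩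
    have := mem_pvFilt.mp (by simpa using hf)
    refine ⟨⟨⟨hv, this.1.1⟩, this.1.2⟩, by simpa using this.2⟩
  · rintro ⟨⟨⟨hv, h1⟩, h2⟩, hu⟩
    have hmem : (j+1) ∈ pvFilt n used := mem_pvFilt.mpr ⟨⟨h1, h2⟩, by simpa using hu⟩
    refine ⟨⟨?_, hv⟩, by simpa using hmem⟩
    simpa using fun hel => hd _ hel hmem

lemma inner_inv (n : Int) : ∀ (ps : List (Int × Int)) (used el : List Int) (b : Bool),
    (∀ k ∈ el, k ∉ pvFilt n used) →
    ∃ d : List Int,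
      ps.foldl pvColA (pvFilt n used, el, b)
        = (pvFilt n (ps.foldl (mColStep n) (used, !b)).1,
           el ++ d,
           !(ps.foldl (mColStep n) (used, !b)).2) ∧
      (ps.foldl (mColStep n) (used, !b)).2 = (!b || !d.isEmpty) ∧
      (∀ k ∈ el ++ d, k ∉ pvFilt n (ps.foldl (mColStep n) (used, !b)).1) := by
  intro ps
  induction ps with
  | nil =>
    intro used el b hd
    exact ⟨[], by simp, by simp, by simpa using hd⟩
  | cons p rest ih =>
    intro used el b hd
    obtain ⟨j, v⟩ := p
    rw [List.foldl_cons, List.foldl_cons]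
    have hc := cond_eq n used el j v hd
    by_cases hfire : (v == 1 && decide (1 ≤ j+1) && decide (j+1 ≤ n) && !(PySem.Set.contains used (j+1))) = true
    · have hmem : (j+1) ∈ pvFilt n used := by
        rw [mem_pvFilt]
        simp only [Bool.and_eq_true, beq_iff_eq, decide_eq_true_eq, Bool.not_eq_true'] at hfire
        refine ⟨⟨hfire.1.1.2, hfire.1.2⟩, ?_⟩
        simpa [PySem.Set.contains] using hfire.2
      have hA : pvColA (pvFilt n used, el, b) (j, v)
          = (pvFilt n (PySem.Set.add used (j+1)), el ++ [j+1], false) := by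
        simp only [pvColA, hc, hfire, if_true]
        rw [filt_remove n used (j+1) hmem]
      have hB : mColStep n (used, !b) (j, v) = (PySem.Set.add used (j+1), true) := by
        simp only [mColStep, hfire, if_true]
      rw [hA, hB]
      have hd' : ∀ k ∈ el ++ [j+1], k ∉ pvFilt n (PySem.Set.add used (j+1)) := by
        intro k hk hmem'
        rw [mem_pvFilt] at hmem'
        rcases List.mem_append.mp hk with hk | hk
        · exact hd k hk (mem_pvFilt.mpr ⟨hmem'.1, fun hu => hmem'.2 (by rw [PySem.Set.mem_add]; left; exact hu)⟩)
        · simp at hk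
          exact hmem'.2 (by rw [PySem.Set.mem_add]; right; omega)
      obtain ⟨d', h1, h2, h3⟩ := ih (PySem.Set.add used (j+1)) (el ++ [j+1]) false hd'
      simp only [Bool.not_false] at h1 h2 h3
      refine ⟨(j+1) :: d', ?_, ?_, ?_⟩
      · rw [h1]; simp
      · rw [h2]; simp
      · intro k hk
        apply h3
        rcases List.mem_append.mp hk with hk | hk
        · exact List.mem_append.mpr (.inl (List.mem_append.mpr (.inl hk)))
        · rcases List.mem_cons.mp hk with hk | hk
          · exact List.mem_append.mpr (.inl (List.mem_append.mpr (.inr (by simp [hk]))))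
          · exact List.mem_append.mpr (.inr hk)
    · have hfire' : (v == 1 && decide (1 ≤ j+1) && decide (j+1 ≤ n) && !(PySem.Set.contains used (j+1))) = false := by
        simpa using hfire
      have hA : pvColA (pvFilt n used, el, b) (j, v) = (pvFilt n used, el, b) := by
        simp only [pvColA]
        rw [hc, hfire']
        simp
      have hB : mColStep n (used, !b) (j, v) = (used, !b) := by
        simp only [mColStep]
        rw [hfire']
        simp
      rw [hA, hB]
      exact ih used el b hd

lemma outer_inv (n : Int) : ∀ (rs : List (List Int)) (used el : List Int)
    (l : List (List Int)) (fs : List Bool) (c : Int) (acc : Bool),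
    (∀ k ∈ el, k ∉ pvFilt n used) →
    (acc = !el.isEmpty) →
    (fs.foldl mCountStep (0, false) = (c, acc)) →
    (c = (l.length : Int)) →
    PySem.List.len (rs.foldl pvRowA (pvFilt n used, l, el)).2.1
      = ((rs.foldl (mRowStep n) (used, fs)).2.foldl mCountStep (0, false)).1 := by
  intro rs
  induction rs with
  | nil =>
    intro used el l fs c acc hd hacc hfold hc
    simp [PySem.List.len, hfold, hc]
  | cons r rs ih =>
    intro used el l fs c acc hd hacc hfold hc
    rw [List.foldl_cons, List.foldl_cons]
    obtain ⟨d, h1, h2, h3⟩ := inner_inv n (PySem.List.enumerate r) used el true hd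
    simp only [Bool.not_true] at h1 h2 h3
    set u' := ((PySem.List.enumerate r).foldl (mColStep n) (used, false)).1 with hu'
    set h' := ((PySem.List.enumerate r).foldl (mColStep n) (used, false)).2 with hh'
    have hrowB : mRowStep n (used, fs) r = (u', fs ++ [h']) := rfl
    have hrowA : pvRowA (pvFilt n used, l, el) r
        = (if (!h') && !((el ++ d) == []) then (pvFilt n u', l ++ [el ++ d], ([] : List Int))
           else (pvFilt n u', l, el ++ d)) := by
      simp only [pvRowA, bridgeInner, h1]
    have hcnt : (fs ++ [h']).foldl mCountStep (0, false)
        = mCountStep (c, acc) h' := by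
      rw [List.foldl_append, hfold]; rfl
    rw [hrowA, hrowB]
    cases hcase : h' with
    | true =>
      rw [hcase] at hcnt
      have hdne : d.isEmpty = false := by
        rw [hcase] at h2; simpa using h2.symm
      have held : (el ++ d).isEmpty = false := by
        cases d with
        | nil => simp at hdne
        | cons a t => cases el <;> simp
      rw [if_neg (by simp [hcase])]
      have := ih u' (el ++ d) l (fs ++ [true]) c true h3 (by simp [held]) ?_ hc
      · exact this
      · rw [hcnt]; simp [mCountStep]
    | false =>
      rw [hcase] at hcnt
      have hdnil : d = [] := by
        rw [hcase] at h2
        cases d with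
        | nil => rfl
        | cons a t => simp at h2
      subst hdnil
      by_cases hel : el = []
      · subst hel
        rw [if_neg (by simp)]
        have := ih u' [] l (fs ++ [false]) c false (by simpa using h3) (by simp) ?_ hc
        · simpa using this
        · rw [hcnt]
          simp only [List.isEmpty_nil, Bool.not_true] at hacc
          simp [mCountStep, hacc]
      · rw [if_pos (by simp [hcase, hel])]
        have := ih u' [] (l ++ [el ++ []]) (fs ++ [false]) (c+1) false (by simp) (by simp) ?_ ?_
        · simpa using this
        · rw [hcnt]
          have : acc = true := by rw [hacc]; simp [hel]
          simp [mCountStep, this]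
        · simp [hc]

lemma alg1_eq_model (graf : List (List Int)) : alg1 graf = mCount graf := by
  simp only [alg1, mCount]
  rw [bridgeA]
  have hstart : PySem.List.pyRange 1 (PySem.List.len graf + 1) 1
      = pvFilt (PySem.List.len graf) [] := by
    simp [pvFilt, PySem.Set.contains]
  rw [hstart]
  simpa [PySem.Set.empty] using
    outer_inv (PySem.List.len graf) graf [] [] [] [] 0 false (by simp) (by simp) (by simp) (by simp)

-- ---- B = model ----

-- 'row has a 1 in column kn' (the hit test of B's inner loop, at a natural column index)
def hitN (row : List Int) (kn : Nat) : Bool :=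
  decide (kn < row.length) && (row.getD kn 0 == 1)

lemma hitN_iff (row : List Int) (kn : Nat) :
    hitN row kn = true ↔ kn < row.length ∧ row.getD kn 0 = 1 := by
  simp [hitN]

lemma hit_cond_cast (row : List Int) (kn : Nat) :
    (decide ((kn : Int) < PySem.List.len row) && (PySem.List.pyGetD row (kn : Int) 0 == 1))
      = hitN row kn := by
  simp [hitN, PySem.List.len]

lemma firstHit_eq (j : Int) : ∀ (graf : List (List Int)) (i0 : Int),
    firstHit j graf i0
      = (List.findIdx? (fun row => decide (j < PySem.List.len row) && (PySem.List.pyGetD row j 0 == 1)) graf).map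
          (fun (k : Nat) => i0 + (k : Int)) := by
  intro graf
  induction graf with
  | nil => intro i0; simp [firstHit]
  | cons r rs ih =>
    intro i0
    show (if decide (j < PySem.List.len r) && (PySem.List.pyGetD r j 0 == 1) then some i0
          else firstHit j rs (i0 + 1)) = _
    rw [List.findIdx?_cons]
    by_cases h : (decide (j < PySem.List.len r) && (PySem.List.pyGetD r j 0 == 1)) = true
    · rw [if_pos h, if_pos h]
      simp
    · rw [if_neg h, if_neg h, ih (i0 + 1), Option.map_map]
      congr 1
      funext k
      simp only [Function.comp_apply]
      push_cast
      ring

lemma mem_foldl_opt (f : Int → Option Int) :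
    ∀ (js : List Int) (s : PySem.Set Int) (k : Int),
      k ∈ js.foldl (fun s j => match f j with | some i => PySem.Set.add s i | none => s) s
        ↔ k ∈ s ∨ ∃ j ∈ js, f j = some k := by
  intro js
  induction js with
  | nil => intro s k; simp
  | cons j js ih =>
    intro s k
    rw [List.foldl_cons]
    cases hj : f j with
    | none =>
      simp only [hj]
      rw [ih]
      constructor
      · rintro (h | ⟨j', hj', h⟩)
        · exact .inl h
        · exact .inr ⟨j', by simp [hj'], h⟩
      · rintro (h | ⟨j', hj', h⟩)
        · exact .inl h
        · rcases List.mem_cons.mp hj' with rfl | hj'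
          · rw [hj] at h; cases h
          · exact .inr ⟨j', hj', h⟩
    | some i =>
      simp only [hj]
      rw [ih, PySem.Set.mem_add]
      constructor
      · rintro ((h | rfl) | ⟨j', hj', h⟩)
        · exact .inl h
        · exact .inr ⟨j, by simp, hj⟩
        · exact .inr ⟨j', by simp [hj'], h⟩
      · rintro (h | ⟨j', hj', h⟩)
        · exact .inl (.inl h)
        · rcases List.mem_cons.mp hj' with rfl | hj'
          · rw [hj] at h; exact .inl (.inr (by injection h.symm))
          · exact .inr ⟨j', hj', h⟩

lemma inner_char (n : Int) : ∀ (row : List Int) (i0 : Int) (used : PySem.Set Int) (b : Bool),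
    (∀ k : Int, k ∈ ((PySem.List.enumerate row i0).foldl (mColStep n) (used, b)).1 ↔
      (k ∈ used ∨ ∃ kn : Nat, kn < row.length ∧ row.getD kn 0 = 1 ∧
        1 ≤ i0 + kn + 1 ∧ i0 + kn + 1 ≤ n ∧ k = i0 + kn + 1))
    ∧ ((PySem.List.enumerate row i0).foldl (mColStep n) (used, b)).2 =
      (b || decide (∃ kn : Nat, kn < row.length ∧ row.getD kn 0 = 1 ∧
        1 ≤ i0 + kn + 1 ∧ i0 + kn + 1 ≤ n ∧ (i0 + kn + 1 : Int) ∉ used)) := by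
  intro row
  induction row with
  | nil =>
    intro i0 used b
    constructor
    · intro k; simp [PySem.List.enumerate]
    · simp [PySem.List.enumerate]
  | cons x xs ih =>
    intro i0 used b
    rw [PySem.List.enumerate_cons, List.foldl_cons]
    by_cases hC : (x == 1 && decide (1 ≤ i0 + 1) && decide (i0 + 1 ≤ n) && !(PySem.Set.contains used (i0 + 1))) = true
    · have hstep : mColStep n (used, b) (i0, x) = (PySem.Set.add used (i0 + 1), true) := by
        simp only [mColStep]; rw [if_pos (by simpa using hC)]
      rw [hstep]
      simp only [Bool.and_eq_true, beq_iff_eq, decide_eq_true_eq, Bool.not_eq_true',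
        PySem.Set.contains_eq_listContains, List.contains_eq_mem, decide_eq_false_iff_not] at hC
      obtain ⟨⟨⟨hx1, hb1⟩, hb2⟩, hnu⟩ := hC
      obtain ⟨ihm, ihf⟩ := ih (i0 + 1) (PySem.Set.add used (i0 + 1)) true
      constructor
      · intro k
        rw [ihm k, PySem.Set.mem_add]
        constructor
        · rintro ((h | rfl) | ⟨kn, hlt, hh, h1, h2, rfl⟩)
          · exact .inl h
          · exact .inr ⟨0, by simp only [List.length_cons]; omega, by simpa using hx1, by omega, by omega, by push_cast; ring⟩
          · exact .inr ⟨kn + 1, by simp only [List.length_cons]; omega, by simpa using hh, by push_cast; push_cast at h1; omega,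
              by push_cast; push_cast at h2; omega, by push_cast; ring⟩
        · rintro (h | ⟨kn, hlt, hh, h1, h2, rfl⟩)
          · exact .inl (.inl h)
          · cases kn with
            | zero =>
              refine .inl (.inr ?_)
              push_cast; ring
            | succ m =>
              refine .inr ⟨m, by simp only [List.length_cons] at hlt; omega, by simpa using hh, by push_cast; push_cast at h1; omega,
                by push_cast; push_cast at h2; omega, by push_cast; ring⟩
      · rw [ihf]
        simp only [Bool.true_or, Bool.or_true]
        symm
        rw [Bool.or_eq_true_iff]
        right
        rw [decide_eq_true_iff]
        exact ⟨0, by simp only [List.length_cons]; omega, by simpa using hx1, by omega, by omega, by simpa using hnu⟩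
    · have hstep : mColStep n (used, b) (i0, x) = (used, b) := by
        simp only [mColStep]; rw [if_neg (by simpa using hC)]
      rw [hstep]
      simp only [Bool.and_eq_true, beq_iff_eq, decide_eq_true_eq, Bool.not_eq_true',
        PySem.Set.contains_eq_listContains, List.contains_eq_mem, decide_eq_false_iff_not,
        not_and] at hC
      obtain ⟨ihm, ihf⟩ := ih (i0 + 1) used b
      have hC' : x = 1 → 1 ≤ i0 + 1 → i0 + 1 ≤ n → (i0 + 1) ∈ used := by
        intro h1 h2 h3
        by_contra hnu
        exact hC ⟨⟨h1, h2⟩, h3⟩ (by simpa using hnu)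
      constructor
      · intro k
        rw [ihm k]
        constructor
        · rintro (h | ⟨kn, hlt, hh, h1, h2, rfl⟩)
          · exact .inl h
          · exact .inr ⟨kn + 1, by simp only [List.length_cons]; omega, by simpa using hh, by push_cast; push_cast at h1; omega,
              by push_cast; push_cast at h2; omega, by push_cast; ring⟩
        · rintro (h | ⟨kn, hlt, hh, h1, h2, rfl⟩)
          · exact .inl h
          · cases kn with
            | zero =>
              left
              have hx1 : x = 1 := by simpa using hh
              have : (i0 + 1) ∈ used := hC' hx1 (by omega) (by simpa using h2)
              simpa using this
            | succ m =>
              exact .inr ⟨m, by simp only [List.length_cons] at hlt; omega, by simpa using hh, by push_cast; push_cast at h1; omega,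
                by push_cast; push_cast at h2; omega, by push_cast; ring⟩
      · rw [ihf]
        congr 1
        rw [decide_eq_decide]
        constructor
        · rintro ⟨kn, hlt, hh, h1, h2, hnu⟩
          exact ⟨kn + 1, by simp only [List.length_cons]; omega, by simpa using hh, by push_cast; push_cast at h1; omega,
            by push_cast; push_cast at h2; omega,
            by push_cast; push_cast at hnu; convert hnu using 2; ring⟩
        · rintro ⟨kn, hlt, hh, h1, h2, hnu⟩
          cases kn with
          | zero =>
            exfalso
            have hx1 : x = 1 := by simpa using hh
            exact hnu (by simpa using hC' hx1 (by omega) (by simpa using h2))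
          | succ m =>
            exact ⟨m, by simp only [List.length_cons] at hlt; omega, by simpa using hh, by push_cast; push_cast at h1; omega,
              by push_cast; push_cast at h2; omega,
              by push_cast; push_cast at hnu; convert hnu using 2; ring⟩

-- per-row 'first to hit some column' flags, relative to already-processed rows 'done'
def flagsFrom (n : Int) : List (List Int) → List (List Int) → List Bool
  | _, [] => []
  | done, r :: rs =>
    (decide (∃ jn : Nat, jn < n.toNat ∧ hitN r jn = true ∧ ∀ r' ∈ done, hitN r' jn = false))
      :: flagsFrom n (done ++ [r]) rs

lemma length_flagsFrom (n : Int) : ∀ (rs done : List (List Int)),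
    (flagsFrom n done rs).length = rs.length := by
  intro rs
  induction rs with
  | nil => intro done; simp [flagsFrom]
  | cons r rs ih => intro done; simp [flagsFrom, ih]

lemma outer_char (n : Int) : ∀ (rest done : List (List Int)) (used : PySem.Set Int) (fl0 : List Bool),
    (∀ k : Int, k ∈ used ↔ ∃ jn : Nat, (jn : Int) + 1 ≤ n ∧ k = (jn : Int) + 1 ∧ ∃ r ∈ done, hitN r jn = true) →
    (rest.foldl (mRowStep n) (used, fl0)).2 = fl0 ++ flagsFrom n done rest := by
  intro rest
  induction rest with
  | nil => intro done used fl0 _; simp [flagsFrom]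
  | cons r rs ih =>
    intro done used fl0 hused
    rw [List.foldl_cons]
    obtain ⟨ihm, ihf⟩ := inner_char n r 0 used false
    have hstep : mRowStep n (used, fl0) r
        = (((PySem.List.enumerate r).foldl (mColStep n) (used, false)).1,
           fl0 ++ [((PySem.List.enumerate r).foldl (mColStep n) (used, false)).2]) := rfl
    rw [hstep]
    have hflag : ((PySem.List.enumerate r).foldl (mColStep n) (used, false)).2
        = decide (∃ jn : Nat, jn < n.toNat ∧ hitN r jn = true ∧ ∀ r' ∈ done, hitN r' jn = false) := by
      rw [ihf]
      simp only [Bool.false_or]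
      rw [decide_eq_decide]
      constructor
      · rintro ⟨kn, hlt, hh, _, h2, hnu⟩
        refine ⟨kn, by omega, (hitN_iff r kn).mpr ⟨hlt, hh⟩, ?_⟩
        intro r' hr'
        by_contra hhit
        exact hnu ((hused _).mpr ⟨kn, by omega, by push_cast; ring, r', hr', by simpa using hhit⟩)
      · rintro ⟨jn, hle, hh, hfresh⟩
        obtain ⟨hjl, hjv⟩ := (hitN_iff r jn).mp hh
        refine ⟨jn, hjl, hjv, by omega, by omega, ?_⟩
        intro hmem
        obtain ⟨jn', _, heq, r', hr', hhit⟩ := (hused _).mp hmem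
        have : jn' = jn := by omega
        subst this
        rw [hfresh r' hr'] at hhit
        cases hhit
    rw [hflag]
    have hused' : ∀ k : Int, k ∈ ((PySem.List.enumerate r).foldl (mColStep n) (used, false)).1 ↔
        ∃ jn : Nat, (jn : Int) + 1 ≤ n ∧ k = (jn : Int) + 1 ∧ ∃ r' ∈ done ++ [r], hitN r' jn = true := by
      intro k
      rw [ihm k]
      constructor
      · rintro (h | ⟨kn, hlt, hh, h1, h2, rfl⟩)
        · obtain ⟨jn, hle, heq, r', hr', hhit⟩ := (hused k).mp h
          exact ⟨jn, hle, heq, r', by simp [hr'], hhit⟩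
        · exact ⟨kn, by omega, by push_cast; ring, r, by simp, (hitN_iff r kn).mpr ⟨hlt, hh⟩⟩
      · rintro ⟨jn, hle, rfl, r', hr', hhit⟩
        rcases List.mem_append.mp hr' with hr' | hr'
        · exact .inl ((hused _).mpr ⟨jn, hle, rfl, r', hr', hhit⟩)
        · simp only [List.mem_singleton] at hr'
          subst hr'
          obtain ⟨hjl, hjv⟩ := (hitN_iff r' jn).mp hhit
          exact .inr ⟨jn, hjl, hjv, by omega, by omega, by push_cast; ring⟩
    rw [ih (done ++ [r]) _ _ hused']
    simp [flagsFrom]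

lemma flagsFrom_getD (n : Int) : ∀ (rs done : List (List Int)) (i : Nat), i < rs.length →
    ((flagsFrom n done rs).getD i false = true ↔
      ∃ jn : Nat, jn < n.toNat ∧
        List.findIdx? (fun r => hitN r jn) (done ++ rs) = some (done.length + i)) := by
  intro rs
  induction rs with
  | nil => intro done i h; simp at h
  | cons r rs ih =>
    intro done i hi
    cases i with
    | zero =>
      simp only [flagsFrom, List.getD_cons_zero, decide_eq_true_iff, Nat.add_zero]
      apply exists_congr
      intro jn
      apply and_congr_right
      intro _
      rw [List.findIdx?_eq_some_iff_findIdx_eq]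
      have hlt : done.length < (done ++ r :: rs).length := by
        simp only [List.length_append, List.length_cons]; omega
      constructor
      · rintro ⟨hh, hfresh⟩
        refine ⟨hlt, ?_⟩
        rw [List.findIdx_eq hlt]
        refine ⟨?_, ?_⟩
        · rw [List.getElem_append_right (le_refl done.length)]
          simpa using hh
        · intro j hj
          rw [List.getElem_append_left hj]
          simpa using hfresh done[j] (List.getElem_mem hj)
      · rintro ⟨hlt', hfind⟩
        rw [List.findIdx_eq hlt'] at hfind
        obtain ⟨hh, hfresh⟩ := hfind
        rw [List.getElem_append_right (le_refl done.length)] at hh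
        refine ⟨by simpa using hh, ?_⟩
        intro r' hr'
        obtain ⟨j, hj, hjeq⟩ := List.mem_iff_getElem.mp hr'
        subst hjeq
        have := hfresh j hj
        rw [List.getElem_append_left hj] at this
        simpa using this
    | succ m =>
      simp only [flagsFrom, List.getD_cons_succ]
      rw [ih (done ++ [r]) m (by simpa using hi)]
      apply exists_congr
      intro jn
      apply and_congr_right
      intro _
      have harr : (done ++ [r]) ++ rs = done ++ r :: rs := by simp
      have hlen2 : (done ++ [r]).length + m = done.length + (m + 1) := by
        simp only [List.length_append, List.length_cons, List.length_nil]; omega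
      rw [harr, hlen2]

lemma acc_snd : ∀ (fs : List Bool) (c : Int) (a : Bool),
    (fs.foldl mCountStep (c, a)).2 = fs.getLastD a := by
  intro fs
  induction fs with
  | nil => intro c a; rfl
  | cons f t ih =>
    intro c a
    rw [List.foldl_cons, List.getLastD_cons]
    have hstep : mCountStep (c, a) f = ((mCountStep (c, a) f).1, f) := by
      cases f <;> cases a <;> simp [mCountStep]
    rw [hstep, ih]

lemma getLastD_eq_getD (l : List Bool) (d : Bool) (h : l ≠ []) :
    l.getLastD d = l.getD (l.length - 1) d := by
  induction l using List.reverseRecOn with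
  | nil => simp at h
  | append_singleton L b _ =>
    rw [List.getLastD_concat, List.getD_append_right _ _ _ _ (by simp)]
    simp

lemma count_eq (g : Int → Bool) : ∀ (fs : List Bool) (N : Int), N = (fs.length : Int) →
    (∀ i : Nat, i < fs.length → g (i : Int) = fs.getD i false) →
    (PySem.List.pyRange 1 N 1).foldl (fun c i => if g (i-1) && !g i then c + 1 else c) 0
      = (fs.foldl mCountStep (0, false)).1 := by
  intro fs
  induction fs using List.reverseRecOn with
  | nil =>
    intro N hN _
    subst hN
    rw [show ((([] : List Bool).length : Int)) = 0 by simp]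
    rw [PySem.List.pyRange_one_eq_nil (by norm_num)]
    rfl
  | append_singleton fs f ih =>
    intro N hN hg
    subst hN
    have hgf : ∀ i : Nat, i < fs.length → g (i : Int) = fs.getD i false := by
      intro i hi
      rw [hg i (by simp only [List.length_append, List.length_cons, List.length_nil]; omega)]
      exact List.getD_append _ _ _ _ hi
    rcases Nat.eq_zero_or_pos fs.length with hm | hm
    · have hfs : fs = [] := List.eq_nil_of_length_eq_zero hm
      subst hfs
      rw [show ((([] : List Bool) ++ [f]).length : Int) = 1 by simp]
      rw [PySem.List.pyRange_one_eq_nil (le_refl 1)]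
      cases f <;> rfl
    · have hcast : (((fs ++ [f]).length : Nat) : Int) = (fs.length : Int) + 1 := by
        simp only [List.length_append, List.length_cons, List.length_nil]; push_cast; ring
      rw [hcast, PySem.List.pyRange_one_succ_right (by exact_mod_cast hm), List.foldl_append,
        ih (fs.length : Int) rfl hgf, List.foldl_append]
      have hgm : g (fs.length : Int) = f := by
        rw [hg fs.length (by simp)]
        rw [List.getD_append_right _ _ _ _ (le_refl fs.length)]
        simp
      have hq2 : (fs.foldl mCountStep (0, false)).2 = fs.getLastD false := acc_snd fs 0 false
      have hgm1 : g ((fs.length : Int) - 1) = (fs.foldl mCountStep (0, false)).2 := by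
        have hc1 : ((fs.length : Int)) - 1 = (((fs.length - 1 : Nat) : Nat) : Int) := by omega
        rw [hc1, hg (fs.length - 1) (by simp only [List.length_append, List.length_cons, List.length_nil]; omega)]
        rw [List.getD_append _ _ _ _ (by omega)]
        rw [hq2, getLastD_eq_getD fs false (by intro hnil; subst hnil; simp at hm)]
      simp only [List.foldl_cons, List.foldl_nil]
      rw [hgm, hgm1]
      cases hf : f <;> cases hb : (fs.foldl mCountStep (0, false)).2 <;>
        simp [mCountStep, hb]

lemma contains_first_iff (graf : List (List Int)) (i : Nat) :
    PySem.Set.contains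
      ((PySem.List.pyRange 0 (PySem.List.len graf) 1).foldl
        (fun s j => match firstHit j graf 0 with | some k => PySem.Set.add s k | none => s)
        PySem.Set.empty) (i : Int) = true
      ↔ ∃ jn : Nat, jn < (PySem.List.len graf).toNat ∧
          List.findIdx? (fun r => hitN r jn) graf = some i := by
  rw [PySem.Set.contains_iff, mem_foldl_opt]
  simp only [PySem.Set.empty, List.not_mem_nil, false_or]
  constructor
  · rintro ⟨j, hj, hfh⟩
    rw [PySem.List.mem_pyRange_one] at hj
    obtain ⟨hj0, hjn⟩ := hj
    have hjcast : j = ((j.toNat : Nat) : Int) := by omega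
    rw [hjcast, firstHit_eq] at hfh
    rw [show (fun row => decide (((j.toNat : Nat) : Int) < PySem.List.len row) &&
          (PySem.List.pyGetD row ((j.toNat : Nat) : Int) 0 == 1))
        = fun row => hitN row j.toNat from funext (fun row => hit_cond_cast row j.toNat)] at hfh
    rcases hk : List.findIdx? (fun r => hitN r j.toNat) graf with _ | k
    · rw [hk] at hfh; cases hfh
    · rw [hk] at hfh
      simp only [Option.map_some, Option.some.injEq] at hfh
      have hk' : k = i := by omega
      subst hk'
      exact ⟨j.toNat, by omega, hk⟩
  · rintro ⟨jn, hle, hfind⟩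
    refine ⟨(jn : Int), ?_, ?_⟩
    · rw [PySem.List.mem_pyRange_one]
      omega
    · rw [firstHit_eq]
      rw [show (fun row => decide ((jn : Int) < PySem.List.len row) &&
            (PySem.List.pyGetD row (jn : Int) 0 == 1))
          = fun row => hitN row jn from funext (fun row => hit_cond_cast row jn)]
      rw [hfind]
      simp

-- ===== VERDICT (by name: the statement is the Claim_ definition above) =====
theorem alg1_spec : Claim_equal_alg1 := by
  intro graf _
  unfold Spec_alg1
  rw [alg1_eq_model]
  simp only [mCount, alg1_alt]
  have hflags : (graf.foldl (mRowStep (PySem.List.len graf)) (PySem.Set.empty, [])).2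
      = flagsFrom (PySem.List.len graf) [] graf := by
    have := outer_char (PySem.List.len graf) graf [] PySem.Set.empty []
      (by intro k; simp [PySem.Set.empty])
    simpa using this
  rw [hflags]
  refine (count_eq _ (flagsFrom (PySem.List.len graf) [] graf) (PySem.List.len graf) ?_ ?_).symm
  · rw [length_flagsFrom]; simp [PySem.List.len]
  · intro i hi
    rw [length_flagsFrom] at hi
    rw [Bool.eq_iff_iff, contains_first_iff graf i,
      flagsFrom_getD (PySem.List.len graf) graf [] i hi]
    simp
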